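-- pv_equiv track=rewrite | github.com/grimme-lab/ArchitectorWrapper | src/util.py | split_dict_into_chunks
-- ===== SOURCE A (Python) =====
-- from typing import Any
--
-- def split_dict_into_chunks(
--     input_dict: dict[Any, Any], num_parts: int
-- ) -> list[dict[Any, Any]]:
--     """Split a dictionary into a specified number of smaller dictionaries.
--
--     Args:
--         input_dict (dict[Any, Any]): The dictionary to split.
--         num_parts (int): The number of smaller dictionaries to create.
--
--     Returns:
--         list[dict[Any, Any]]: A list of smaller dictionaries.
--     """
--     dict_items = list(input_dict.items())
--     dict_length = len(dict_items)
--
--     # Calculate the size of each chunk and the number of remaining items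
--     chunk_size, remaining_items = divmod(dict_length, num_parts)
--
--     chunks = []
--     start = 0
--
--     for _ in range(num_parts):
--         # Add an extra item to the current chunk if there are remaining items
--         extra_item = 1 if remaining_items > 0 else 0
--         chunk_end = start + chunk_size + extra_item
--
--         # Create the current chunk and add it to the list of chunks
--         chunks.append(dict(dict_items[start:chunk_end]))
--
--         # Update the start point for the next iteration
--         start = chunk_end
--         remaining_items -= extra_item
--
--     return chunks
-- ===== SOURCE B (Python) =====
-- def split_dict_into_chunks(input_dict, num_parts):
--     """Split a dictionary into num_parts smaller dictionaries (remainder to the first chunks)."""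
--     items = list(input_dict.items())
--     chunk_size, remaining_items = divmod(len(items), num_parts)
--
--     def boundary(i):
--         return i * chunk_size + min(i, remaining_items)
--
--     return [dict(items[boundary(i):boundary(i + 1)]) for i in range(num_parts)]
-- ===== Notes on version B (the rewrite author's own statement) =====
-- stated objective: simpler
-- what changed: replaces A's stateful loop carrying (start, remaining_items) across iterations with a closed-form chunk-boundary function i*chunk_size + min(i, remaining_items) and a single comprehension that slices each chunk directly
import Mathlib
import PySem

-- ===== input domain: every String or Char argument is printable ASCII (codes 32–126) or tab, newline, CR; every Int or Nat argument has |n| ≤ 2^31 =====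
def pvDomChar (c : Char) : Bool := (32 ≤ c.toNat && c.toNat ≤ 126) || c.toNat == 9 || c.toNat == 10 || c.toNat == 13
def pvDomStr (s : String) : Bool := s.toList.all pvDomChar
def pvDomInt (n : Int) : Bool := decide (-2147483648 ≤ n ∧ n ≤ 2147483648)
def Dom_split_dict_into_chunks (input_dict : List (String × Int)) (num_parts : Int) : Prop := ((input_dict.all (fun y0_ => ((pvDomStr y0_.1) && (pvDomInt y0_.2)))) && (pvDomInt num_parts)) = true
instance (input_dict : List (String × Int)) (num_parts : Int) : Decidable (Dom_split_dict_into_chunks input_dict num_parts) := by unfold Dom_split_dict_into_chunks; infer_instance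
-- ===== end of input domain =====

-- B replaces A's stateful loop (start, remaining_items) by a closed-form chunk-boundary
-- function and one comprehension; same results, proved equal for num_parts ≠ 0 (A raises at 0).


-- ===== PORT A =====
-- dict(slice) is ported as (PySem.Dict.ofList slice).items (exact Python dict construction)
def split_dict_into_chunks (input_dict : List (String × Int)) (num_parts : Int) : List (List (String × Int)) :=
  let dict_items := input_dict
  let dict_length : Int := PySem.List.len dict_items
  match PySem.Int.divmod? dict_length num_parts with
  | none => []   -- unreachable under Pre_: Python raises ZeroDivisionError when num_parts = 0
  | some qr =>
    let chunk_size := qr.1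
    (((PySem.List.pyRange 0 num_parts 1).foldl
      (fun st _ =>
        let extra_item : Int := if st.2.2 > 0 then 1 else 0
        let chunk_end := st.2.1 + chunk_size + extra_item
        (st.1 ++ [(PySem.Dict.ofList (PySem.List.slice dict_items (some st.2.1) (some chunk_end))).items],
         chunk_end, st.2.2 - extra_item))
      (([] : List (List (String × Int))), (0 : Int), qr.2))).1

-- ===== PORT B =====
def split_dict_into_chunks_alt (input_dict : List (String × Int)) (num_parts : Int) : List (List (String × Int)) :=
  let items := input_dict
  match PySem.Int.divmod? (PySem.List.len items) num_parts with
  | none => []   -- unreachable under Pre_: Python raises ZeroDivisionError when num_parts = 0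
  | some qr =>
    let boundary : Int → Int := fun i => i * qr.1 + min i qr.2
    (PySem.List.pyRange 0 num_parts 1).map (fun i =>
      (PySem.Dict.ofList (PySem.List.slice items (some (boundary i)) (some (boundary (i + 1))))).items)

-- ===== PRECONDITION & SPEC =====
-- num_parts = 0 makes divmod raise ZeroDivisionError in both Pythons; nothing else is excluded.
def Pre_split_dict_into_chunks (input_dict : List (String × Int)) (num_parts : Int) : Prop := num_parts ≠ 0
instance (input_dict : List (String × Int)) (num_parts : Int) : Decidable (Pre_split_dict_into_chunks input_dict num_parts) := by unfold Pre_split_dict_into_chunks; infer_instance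
def pvWitness_split_dict_into_chunks : (List (String × Int)) × Int := ([("a", 1)], 1)
def Spec_split_dict_into_chunks (input_dict : List (String × Int)) (num_parts : Int) (out : List (List (String × Int))) : Prop := out = split_dict_into_chunks_alt input_dict num_parts
instance (input_dict : List (String × Int)) (num_parts : Int) (out : List (List (String × Int))) : Decidable (Spec_split_dict_into_chunks input_dict num_parts out) := by unfold Spec_split_dict_into_chunks; infer_instance

-- ===== CLAIM (what is proved, stated in full; the proofs are below) =====
def Claim_equal_split_dict_into_chunks : Prop := ∀ (input_dict : List (String × Int)) (num_parts : Int), Dom_split_dict_into_chunks input_dict num_parts → Pre_split_dict_into_chunks input_dict num_parts → Spec_split_dict_into_chunks input_dict num_parts (split_dict_into_chunks input_dict num_parts)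

-- ===== LEMMAS AND PROOFS =====

-- Invariant of A's loop: after the first k iterations the state is
-- (the first k of B's chunks, boundary k, r - min k r).
lemma chunks_loop_invariant (items : List (String × Int)) (q r : Int) (hr : 0 ≤ r) (k : Nat) :
    ((PySem.List.pyRange 0 (k : Int) 1).foldl
      (fun (st : List (List (String × Int)) × Int × Int) (_ : Int) =>
        (st.1 ++ [(PySem.Dict.ofList (PySem.List.slice items (some st.2.1)
            (some (st.2.1 + q + if st.2.2 > 0 then 1 else 0)))).items],
         st.2.1 + q + (if st.2.2 > 0 then 1 else 0),
         st.2.2 - (if st.2.2 > 0 then 1 else 0)))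
      (([] : List (List (String × Int))), (0 : Int), r))
    = ((PySem.List.pyRange 0 (k : Int) 1).map (fun i =>
        (PySem.Dict.ofList (PySem.List.slice items (some (i * q + min i r)) (some ((i + 1) * q + min (i + 1) r)))).items),
       (k : Int) * q + min (k : Int) r, r - min (k : Int) r) := by
  induction k with
  | zero => simp [PySem.List.pyRange_one_eq_nil, min_eq_left hr]
  | succ k ih =>
    have hk : (0 : Int) ≤ (k : Int) := by positivity
    have hstep : ((k : Int) + 1 : Int) = ((k + 1 : Nat) : Int) := by push_cast; ring
    rw [← hstep, PySem.List.pyRange_one_succ_right hk, List.foldl_append, List.map_append, ih]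
    simp only [List.foldl_cons, List.foldl_nil, List.map_cons, List.map_nil, Prod.mk.injEq]
    have hmin : (if r - min (k : Int) r > 0 then (1 : Int) else 0) = min ((k : Int) + 1) r - min (k : Int) r := by
      split_ifs with h <;> omega
    have hq : (((k : Int) + 1)) * q = (k : Int) * q + q := by ring
    have hb : (k : Int) * q + min (k : Int) r + q + (if r - min (k : Int) r > 0 then (1 : Int) else 0)
        = ((k : Int) + 1) * q + min ((k : Int) + 1) r := by
      rw [hmin, hq]; ring
    refine ⟨by rw [hb], by rw [hb], by rw [hmin]; ring⟩

theorem split_dict_into_chunks_eq (input_dict : List (String × Int)) (num_parts : Int)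
    (hp : num_parts ≠ 0) :
    split_dict_into_chunks input_dict num_parts = split_dict_into_chunks_alt input_dict num_parts := by
  unfold split_dict_into_chunks split_dict_into_chunks_alt
  have hdm : PySem.Int.divmod? (PySem.List.len input_dict) num_parts
      = some (PySem.Int.floordiv (PySem.List.len input_dict) num_parts,
              PySem.Int.mod (PySem.List.len input_dict) num_parts) := by
    simp [PySem.Int.divmod?, PySem.Int.floordiv, PySem.Int.mod, hp]
  simp only [hdm]
  rcases lt_or_gt_of_ne hp with hneg | hpos
  · -- num_parts < 0 : range(num_parts) is empty, both sides are []
    rw [PySem.List.pyRange_one_eq_nil (by omega : num_parts ≤ 0)]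
    simp
  · -- num_parts > 0 : 0 ≤ r, apply the loop invariant at k = num_parts.toNat
    have hr : 0 ≤ PySem.Int.mod (PySem.List.len input_dict) num_parts :=
      PySem.Int.mod_nonneg _ hpos
    have hcast : ((num_parts.toNat : Int)) = num_parts := Int.toNat_of_nonneg (le_of_lt hpos)
    rw [← hcast]
    rw [chunks_loop_invariant input_dict
        (PySem.Int.floordiv (PySem.List.len input_dict) (num_parts.toNat : Int))
        (PySem.Int.mod (PySem.List.len input_dict) (num_parts.toNat : Int))
        (by rw [hcast]; exact hr) num_parts.toNat]

-- ===== VERDICT (by name: the statement is the Claim_ definition above) =====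
theorem split_dict_into_chunks_spec : Claim_equal_split_dict_into_chunks := by
  intro input_dict num_parts _ hpre
  unfold Spec_split_dict_into_chunks
  exact split_dict_into_chunks_eq input_dict num_parts hpre
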